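-- pv_equiv track=rewrite | github.com/bijux/bijux-atlas | packages/atlasctl/src/atlasctl/checks/domains/internal.py | _cycle_paths
-- ===== SOURCE A (Python) =====
-- def _cycle_paths(graph: dict[str, set[str]]) -> list[list[str]]:
--     visiting: set[str] = set()
--     visited: set[str] = set()
--     stack: list[str] = []
--     cycles: list[list[str]] = []
--
--     def _visit(node: str) -> None:
--         if node in visited:
--             return
--         if node in visiting:
--             if node in stack:
--                 start = stack.index(node)
--                 cycle = stack[start:] + [node]
--                 cycles.append(cycle)
--             return
--         visiting.add(node)
--         stack.append(node)
--         for nxt in sorted(graph.get(node, ())):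
--             _visit(nxt)
--         stack.pop()
--         visiting.remove(node)
--         visited.add(node)
--
--     for mod in sorted(graph):
--         _visit(mod)
--     return cycles
-- ===== SOURCE B (Python) =====
-- def _cycle_paths(graph: dict[str, set[str]]) -> list[list[str]]:
--     visiting: set[str] = set()
--     visited: set[str] = set()
--     stack: list[str] = []
--     cycles: list[list[str]] = []
--
--     for root in sorted(graph):
--         if root in visited:
--             continue
--         visiting.add(root)
--         stack.append(root)
--         frames = [(root, iter(sorted(graph.get(root, ()))))]
--         while frames:
--             node, it = frames[-1]
--             child = next(it, None)
--             if child is None: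
--                 frames.pop()
--                 stack.pop()
--                 visiting.remove(node)
--                 visited.add(node)
--             elif child in visited:
--                 pass
--             elif child in visiting:
--                 if child in stack:
--                     start = stack.index(child)
--                     cycles.append(stack[start:] + [child])
--             else:
--                 visiting.add(child)
--                 stack.append(child)
--                 frames.append((child, iter(sorted(graph.get(child, ())))))
--     return cycles
-- ===== Notes on version B (the rewrite author's own statement) =====
-- stated objective: alternative
-- what changed: The recursive _visit DFS (closure mutating shared state) is replaced by an iterative DFS with an explicit stack of (node, remaining-children-iterator) frames; cycle recording and the visiting/visited/stack teardown happen at the same moments, so the output is identical.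
import Mathlib
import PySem

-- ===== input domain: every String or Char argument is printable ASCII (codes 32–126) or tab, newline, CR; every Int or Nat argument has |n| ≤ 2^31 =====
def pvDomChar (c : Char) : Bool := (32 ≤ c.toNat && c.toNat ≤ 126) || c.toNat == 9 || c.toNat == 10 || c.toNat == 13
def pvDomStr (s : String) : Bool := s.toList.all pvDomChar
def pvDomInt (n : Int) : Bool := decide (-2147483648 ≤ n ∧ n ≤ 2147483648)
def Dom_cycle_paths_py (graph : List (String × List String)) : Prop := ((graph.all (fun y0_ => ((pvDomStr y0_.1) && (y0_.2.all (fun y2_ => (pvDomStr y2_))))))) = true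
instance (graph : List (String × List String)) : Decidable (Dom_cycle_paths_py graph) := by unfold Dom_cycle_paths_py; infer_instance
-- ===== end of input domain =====

-- B replaces A's recursive DFS with an explicit stack of (node, remaining-children) frames
-- driven iteratively; same return value, no recursion (objective: alternative decomposition).


-- ===== PORT A =====
-- Shared state of the Python locals (both Pythons manipulate the same four locals).
structure DfsSt where
  visiting : List String          -- Python set 'visiting' (PySem.Set rep)
  visited  : List String          -- Python set 'visited'
  stack    : List String
  cycles   : List (List String)
deriving Repr, DecidableEq

def dfsInit : DfsSt := ⟨[], [], [], []⟩

-- sorted(graph.get(node, ()))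
def childrenOf (graph : List (String × List String)) (node : String) : List String :=
  PySem.List.sorted (((PySem.Dict.mk graph).get? node).getD []) (fun x => x) false

-- visiting.add(node); stack.append(node)
def pushNode (node : String) (st : DfsSt) : DfsSt :=
  { st with visiting := PySem.Set.add st.visiting node, stack := st.stack ++ [node] }

-- stack.pop(); visiting.remove(node); visited.add(node)
-- ('node' is always a member of 'visiting' at every call site, so Python's set.remove
--  computes exactly Set.discard there)
def teardownNode (node : String) (st : DfsSt) : DfsSt :=
  { st with stack := st.stack.dropLast,
            visiting := PySem.Set.discard st.visiting node,
            visited := PySem.Set.add st.visited node }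

-- if node in stack: start = stack.index(node); cycles.append(stack[start:] + [node])
def recordCycle (node : String) (st : DfsSt) : DfsSt :=
  match PySem.List.index? st.stack node with
  | some start =>
      { st with cycles := st.cycles ++ [PySem.List.slice st.stack (some (start : Int)) none ++ [node]] }
  | none => st

-- the recursive _visit, fuel-guarded (fuelA below always exceeds the recursion depth)
def visitA (graph : List (String × List String)) : Nat → String → DfsSt → Option DfsSt
  | 0, _, _ => none
  | f + 1, node, st =>
    if node ∈ st.visited then some st
    else if node ∈ st.visiting then some (recordCycle node st)
    else
      ((childrenOf graph node).foldl (fun acc c => acc.bind (visitA graph f c))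
        (some (pushNode node st))).map (teardownNode node)

-- a run of _visit over a list of nodes (the for-loops of A)
def listVisitA (graph : List (String × List String)) (f : Nat) (cs : List String) (st : DfsSt) :
    Option DfsSt :=
  cs.foldl (fun acc c => acc.bind (visitA graph f c)) (some st)

def fuelA (graph : List (String × List String)) : Nat :=
  graph.length + (graph.map (fun p => p.2.length)).sum + 1

def cycle_paths_py (graph : List (String × List String)) : List (List String) :=
  match listVisitA graph (fuelA graph)
      (PySem.List.sorted ((PySem.Dict.mk graph).keys) (fun x => x) false) dfsInit with
  | some st => st.cycles
  | none => []     -- unreachable: fuelA exceeds the DFS recursion depth (proved below)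

-- ===== PORT B =====
-- termination measure helpers for the frame machine
def framesNodes (frames : List (String × List String)) : List String :=
  frames.flatMap (fun p => p.1 :: p.2)

def freshCount (graph frames : List (String × List String)) (st : DfsSt) : Nat :=
  (((graph.flatMap (fun p => p.1 :: p.2)) ++ framesNodes frames).toFinset.filter
    (fun y => y ∉ st.visiting ∧ y ∉ st.visited)).card

def wBound (graph : List (String × List String)) : Nat :=
  (graph.map (fun p => p.2.length)).sum + 1

def pendSize (frames : List (String × List String)) : Nat :=
  (frames.map (fun p => p.2.length + 1)).sum

lemma mem_childrenOf {graph : List (String × List String)} {c y : String}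
    (h : y ∈ childrenOf graph c) : y ∈ graph.flatMap (fun p => p.1 :: p.2) := by
  rw [childrenOf, PySem.List.mem_sorted] at h
  cases hg : (PySem.Dict.mk graph).get? c with
  | none => rw [hg] at h; simp at h
  | some vs =>
    rw [hg] at h; simp at h
    have hm := PySem.Dict.mem_items_of_get?_eq_some _ hg
    exact List.mem_flatMap.mpr ⟨(c, vs), hm, by simp [h]⟩

lemma length_childrenOf (graph : List (String × List String)) (c : String) :
    (childrenOf graph c).length < wBound graph := by
  rw [childrenOf, PySem.List.length_sorted, wBound]
  cases hg : (PySem.Dict.mk graph).get? c with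
  | none => simp
  | some vs =>
    have hm : (c, vs) ∈ graph := PySem.Dict.mem_items_of_get?_eq_some _ hg
    have : vs.length ≤ (graph.map (fun p => p.2.length)).sum :=
      List.single_le_sum (by intro x _; omega) _ (List.mem_map.mpr ⟨(c, vs), hm, rfl⟩)
    simp; omega

lemma framesNodes_cons (a : String) (b : List String) (r : List (String × List String)) :
    framesNodes ((a, b) :: r) = a :: (b ++ framesNodes r) := by
  simp [framesNodes]

lemma fc_le (graph : List (String × List String)) {fr1 fr2 : List (String × List String)}
    {st1 st2 : DfsSt}
    (hU : ∀ y, y ∈ framesNodes fr1 → y ∈ graph.flatMap (fun p => p.1 :: p.2) ∨ y ∈ framesNodes fr2)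
    (hP : ∀ y, y ∉ st1.visiting → y ∉ st1.visited → y ∉ st2.visiting ∧ y ∉ st2.visited) :
    freshCount graph fr1 st1 ≤ freshCount graph fr2 st2 := by
  apply Finset.card_le_card
  intro y hy
  simp only [Finset.mem_filter, List.mem_toFinset, List.mem_append] at hy ⊢
  obtain ⟨hyU, hy1, hy2⟩ := hy
  refine ⟨?_, hP y hy1 hy2⟩
  rcases hyU with h | h
  · exact Or.inl h
  · exact hU y h

lemma fc_teardown_le (graph : List (String × List String)) (node : String)
    (cs : List String) (rest : List (String × List String)) (st : DfsSt) :
    freshCount graph rest (teardownNode node st) ≤ freshCount graph ((node, cs) :: rest) st := by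
  apply fc_le
  · intro y hy; right; rw [framesNodes_cons]; simp only [List.mem_cons, List.mem_append]; tauto
  · intro y h1 h2
    simp only [teardownNode] at h1 h2
    rw [PySem.Set.mem_add] at h2
    push Not at h2
    constructor
    · intro hv
      exact h1 ((PySem.Set.mem_discard _ _ _).mpr ⟨hv, h2.2⟩)
    · exact h2.1

lemma fc_skip_le (graph : List (String × List String)) (node c : String)
    (cs' : List String) (rest : List (String × List String)) (st st' : DfsSt)
    (hvg : st'.visiting = st.visiting) (hvd : st'.visited = st.visited) :
    freshCount graph ((node, cs') :: rest) st' ≤ freshCount graph ((node, c :: cs') :: rest) st := by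
  apply fc_le
  · intro y hy; right
    rw [framesNodes_cons] at hy ⊢
    simp only [List.mem_cons, List.mem_append] at hy ⊢; tauto
  · intro y h1 h2; rw [hvg] at h1; rw [hvd] at h2; exact ⟨h1, h2⟩

lemma fc_push_lt (graph : List (String × List String)) (node c : String)
    (cs' : List String) (rest : List (String × List String)) (st : DfsSt)
    (hvg : c ∉ st.visiting) (hvd : c ∉ st.visited) :
    freshCount graph ((c, childrenOf graph c) :: (node, cs') :: rest) (pushNode c st) <
      freshCount graph ((node, c :: cs') :: rest) st := by
  apply Finset.card_lt_card
  rw [Finset.ssubset_iff_of_subset]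
  · refine ⟨c, ?_, ?_⟩
    · simp only [Finset.mem_filter, List.mem_toFinset, List.mem_append]
      refine ⟨Or.inr ?_, hvg, hvd⟩
      rw [framesNodes_cons]; simp
    · simp only [Finset.mem_filter, List.mem_toFinset, not_and, not_not]
      intro _ hc
      exact absurd ((PySem.Set.mem_add _ _ _).mpr (Or.inr rfl)) hc
  · intro y hy
    simp only [Finset.mem_filter, List.mem_toFinset, List.mem_append] at hy ⊢
    obtain ⟨hyU, hy1, hy2⟩ := hy
    simp only [pushNode] at hy1 hy2
    have hy1' : y ∉ st.visiting := fun h => hy1 ((PySem.Set.mem_add _ _ _).mpr (Or.inl h))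
    refine ⟨?_, hy1', hy2⟩
    rcases hyU with h | h
    · exact Or.inl h
    · rw [framesNodes_cons, framesNodes_cons] at h
      rw [framesNodes_cons]
      simp only [List.mem_cons, List.mem_append] at h ⊢
      by_cases hch : y ∈ childrenOf graph c
      · exact Or.inl (mem_childrenOf hch)
      · right; tauto

-- the iterative frame machine of B: frames hold (node, remaining sorted children)
def runB (graph : List (String × List String)) :
    List (String × List String) → DfsSt → DfsSt
  | [], st => st
  | (node, []) :: rest, st => runB graph rest (teardownNode node st)
  | (node, c :: cs') :: rest, st =>
    if hvd : c ∈ st.visited then runB graph ((node, cs') :: rest) st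
    else if hvg : c ∈ st.visiting then runB graph ((node, cs') :: rest) (recordCycle c st)
    else runB graph ((c, childrenOf graph c) :: (node, cs') :: rest) (pushNode c st)
termination_by frames st => freshCount graph frames st * wBound graph + pendSize frames
decreasing_by
  · have h1 := fc_teardown_le graph node [] rest st
    have h2 := Nat.mul_le_mul_right (wBound graph) h1
    simp [pendSize]; omega
  · have h1 := fc_skip_le graph node c cs' rest st st rfl rfl
    have h2 := Nat.mul_le_mul_right (wBound graph) h1
    simp [pendSize]; omega
  · have h1 := fc_skip_le graph node c cs' rest st (recordCycle c st)
      (by unfold recordCycle; cases PySem.List.index? st.stack c <;> rfl)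
      (by unfold recordCycle; cases PySem.List.index? st.stack c <;> rfl)
    have h2 := Nat.mul_le_mul_right (wBound graph) h1
    simp [pendSize]; omega
  · have h1 := fc_push_lt graph node c cs' rest st hvg hvd
    have h2 := Nat.mul_le_mul_right (wBound graph) (Nat.succ_le_of_lt h1)
    rw [Nat.succ_mul] at h2
    have h3 := length_childrenOf graph c
    simp [pendSize]; omega

def cycle_paths_py_alt (graph : List (String × List String)) : List (List String) :=
  ((PySem.List.sorted ((PySem.Dict.mk graph).keys) (fun x => x) false).foldl
    (fun st root =>
      if root ∈ st.visited then st
      else runB graph [(root, childrenOf graph root)] (pushNode root st))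
    dfsInit).cycles

-- ===== PRECONDITION & SPEC =====
def Spec_cycle_paths_py (graph : List (String × List String)) (out : List (List String)) : Prop := out = cycle_paths_py_alt graph
instance (graph : List (String × List String)) (out : List (List String)) : Decidable (Spec_cycle_paths_py graph out) := by unfold Spec_cycle_paths_py; infer_instance

-- ===== CLAIM (what is proved, stated in full; the proofs are below) =====
def Claim_equal_cycle_paths_py : Prop := ∀ (graph : List (String × List String)), Dom_cycle_paths_py graph → Spec_cycle_paths_py graph (cycle_paths_py graph)

-- ===== LEMMAS AND PROOFS =====

@[simp] lemma recordCycle_visiting (c : String) (st : DfsSt) :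
    (recordCycle c st).visiting = st.visiting := by
  unfold recordCycle; cases PySem.List.index? st.stack c <;> rfl

@[simp] lemma recordCycle_visited (c : String) (st : DfsSt) :
    (recordCycle c st).visited = st.visited := by
  unfold recordCycle; cases PySem.List.index? st.stack c <;> rfl

@[simp] lemma recordCycle_stack (c : String) (st : DfsSt) :
    (recordCycle c st).stack = st.stack := by
  unfold recordCycle; cases PySem.List.index? st.stack c <;> rfl


lemma foldl_bind_none (graph : List (String × List String)) (f : Nat) (cs : List String) :
    cs.foldl (fun acc c => acc.bind (visitA graph f c)) none = none := by
  induction cs with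
  | nil => rfl
  | cons c cs ih => simpa using ih

lemma listVisitA_nil (graph : List (String × List String)) (f : Nat) (st : DfsSt) :
    listVisitA graph f [] st = some st := rfl

lemma listVisitA_cons (graph : List (String × List String)) (f : Nat) (c : String)
    (cs : List String) (st : DfsSt) :
    listVisitA graph f (c :: cs) st = (visitA graph f c st).bind (listVisitA graph f cs) := by
  cases h : visitA graph f c st with
  | none => simp [listVisitA, h, foldl_bind_none]
  | some st₂ => simp [listVisitA, h]

lemma discard_add_of_not_mem {s : List String} {x : String} (h : x ∉ s) :
    PySem.Set.discard (PySem.Set.add s x) x = s := by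
  rw [PySem.Set.add_of_not_mem h]
  show (s ++ [x]).filter (fun y => !y == x) = s
  rw [List.filter_append]
  have h1 : s.filter (fun y => !y == x) = s :=
    List.filter_eq_self.mpr (by intro y hy; simp; exact fun hyx => h (hyx ▸ hy))
  simp [h1]

-- restoration: a successful _visit run restores visiting and stack and only grows visited
lemma stateA (graph : List (String × List String)) : ∀ f : Nat,
    (∀ x st r, visitA graph f x st = some r →
      r.visiting = st.visiting ∧ r.stack = st.stack ∧ ∀ y ∈ st.visited, y ∈ r.visited) ∧
    (∀ cs st r, listVisitA graph f cs st = some r →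
      r.visiting = st.visiting ∧ r.stack = st.stack ∧ ∀ y ∈ st.visited, y ∈ r.visited) := by
  intro f
  induction f with
  | zero =>
    constructor
    · intro x st r h; simp [visitA] at h
    · intro cs st r h
      cases cs with
      | nil => rw [listVisitA_nil] at h; cases h; exact ⟨rfl, rfl, fun y hy => hy⟩
      | cons c cs => rw [listVisitA_cons] at h; simp [visitA] at h
  | succ f ih =>
    obtain ⟨ihv, ihl⟩ := ih
    have hv : ∀ x st r, visitA graph (f + 1) x st = some r →
        r.visiting = st.visiting ∧ r.stack = st.stack ∧ ∀ y ∈ st.visited, y ∈ r.visited := by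
      intro x st r h
      rw [visitA] at h
      split_ifs at h with h1 h2
      · cases h; exact ⟨rfl, rfl, fun y hy => hy⟩
      · cases h; exact ⟨by simp, by simp, by simp⟩
      · rw [show ((childrenOf graph x).foldl (fun acc c => acc.bind (visitA graph f c))
            (some (pushNode x st))) = listVisitA graph f (childrenOf graph x) (pushNode x st)
            from rfl] at h
        cases hl2 : listVisitA graph f (childrenOf graph x) (pushNode x st) with
        | none => rw [hl2] at h; simp at h
        | some st₂ =>
          rw [hl2] at h; simp at h
          obtain ⟨e1, e2, e3⟩ := ihl _ _ _ hl2
          subst h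
          refine ⟨?_, ?_, ?_⟩
          · show PySem.Set.discard st₂.visiting x = st.visiting
            rw [e1]; exact discard_add_of_not_mem h2
          · show st₂.stack.dropLast = st.stack
            rw [e2]; exact List.dropLast_concat
          · intro y hy
            exact (PySem.Set.mem_add _ _ _).mpr (Or.inl (e3 y hy))
    have hl : ∀ cs st r, listVisitA graph (f + 1) cs st = some r →
        r.visiting = st.visiting ∧ r.stack = st.stack ∧ ∀ y ∈ st.visited, y ∈ r.visited := by
      intro cs
      induction cs with
      | nil => intro st r h; rw [listVisitA_nil] at h; cases h; exact ⟨rfl, rfl, fun y hy => hy⟩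
      | cons c cs ihc =>
        intro st r h
        rw [listVisitA_cons] at h
        cases h1 : visitA graph (f + 1) c st with
        | none => rw [h1] at h; simp at h
        | some st₂ =>
          rw [h1] at h; simp at h
          obtain ⟨a1, a2, a3⟩ := hv _ _ _ h1
          obtain ⟨b1, b2, b3⟩ := ihc _ _ h
          exact ⟨b1.trans a1, b2.trans a2, fun y hy => b3 y (a3 y hy)⟩
    exact ⟨hv, hl⟩

-- the fresh-node count for the recursion (frames-free form)
def freshCountA (graph : List (String × List String)) (st : DfsSt) : Nat :=
  ((graph.flatMap (fun p => p.1 :: p.2)).toFinset.filter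
    (fun y => y ∉ st.visiting ∧ y ∉ st.visited)).card

lemma freshA_le_of (graph : List (String × List String)) {st r : DfsSt}
    (h1 : r.visiting = st.visiting) (h2 : ∀ y ∈ st.visited, y ∈ r.visited) :
    freshCountA graph r ≤ freshCountA graph st := by
  apply Finset.card_le_card
  intro y hy
  simp only [Finset.mem_filter] at hy ⊢
  obtain ⟨hU, a1, a2⟩ := hy
  rw [h1] at a1
  exact ⟨hU, a1, fun hv => a2 (h2 y hv)⟩

lemma freshA_push_lt (graph : List (String × List String)) {st : DfsSt} {x : String}
    (hx : x ∈ graph.flatMap (fun p => p.1 :: p.2))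
    (hvg : x ∉ st.visiting) (hvd : x ∉ st.visited) :
    freshCountA graph (pushNode x st) < freshCountA graph st := by
  apply Finset.card_lt_card
  rw [Finset.ssubset_iff_of_subset]
  · refine ⟨x, ?_, ?_⟩
    · simp only [Finset.mem_filter, List.mem_toFinset]; exact ⟨hx, hvg, hvd⟩
    · simp only [Finset.mem_filter, not_and, not_not]
      intro _ h
      exact absurd ((PySem.Set.mem_add _ _ _).mpr (Or.inr rfl)) h
  · intro y hy
    simp only [Finset.mem_filter] at hy ⊢
    obtain ⟨hU, a1, a2⟩ := hy
    simp only [pushNode] at a1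
    exact ⟨hU, fun h => a1 ((PySem.Set.mem_add _ _ _).mpr (Or.inl h)), a2⟩

lemma childrenOf_of_not_mem {graph : List (String × List String)} {x : String}
    (hx : x ∉ graph.flatMap (fun p => p.1 :: p.2)) : childrenOf graph x = [] := by
  cases hg : (PySem.Dict.mk graph).get? x with
  | none => simp [childrenOf, hg, PySem.List.sorted_eq_nil_iff]
  | some vs =>
    exfalso
    have hm : (x, vs) ∈ graph := PySem.Dict.mem_items_of_get?_eq_some _ hg
    exact hx (List.mem_flatMap.mpr ⟨(x, vs), hm, by simp⟩)

-- totality of the fueled recursion: enough fuel always yields some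
lemma totA (graph : List (String × List String)) : ∀ f : Nat,
    (∀ x st, freshCountA graph st < f → (visitA graph f x st).isSome) ∧
    (∀ cs st, freshCountA graph st < f → (listVisitA graph f cs st).isSome) := by
  intro f
  induction f with
  | zero => exact ⟨fun x st h => absurd h (by omega), fun cs st h => absurd h (by omega)⟩
  | succ f ih =>
    obtain ⟨ihv, ihl⟩ := ih
    have hv : ∀ x st, freshCountA graph st < f + 1 → (visitA graph (f + 1) x st).isSome := by
      intro x st hf
      rw [visitA]
      split_ifs with h1 h2
      · rfl
      · rfl
      · rw [Option.isSome_map]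
        show (listVisitA graph f (childrenOf graph x) (pushNode x st)).isSome = true
        by_cases hx : x ∈ graph.flatMap (fun p => p.1 :: p.2)
        · have hlt := freshA_push_lt graph hx h2 h1
          exact ihl (childrenOf graph x) (pushNode x st) (by omega)
        · rw [childrenOf_of_not_mem hx, listVisitA_nil]; rfl
    have hl : ∀ cs st, freshCountA graph st < f + 1 → (listVisitA graph (f + 1) cs st).isSome := by
      intro cs
      induction cs with
      | nil => intro st _; rw [listVisitA_nil]; rfl
      | cons c cs ihc =>
        intro st hf
        rw [listVisitA_cons]
        have := hv c st hf
        cases h1 : visitA graph (f + 1) c st with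
        | none => rw [h1] at this; simp at this
        | some st₂ =>
          simp only [Option.bind_some]
          obtain ⟨e1, _, e3⟩ := (stateA graph (f + 1)).1 _ _ _ h1
          exact ihc st₂ (by have := freshA_le_of graph e1 e3; omega)
    exact ⟨hv, hl⟩

-- the frame simulation: one frame with remaining children cs behaves as the recursive
-- child loop followed by the teardown
lemma frameSim (graph : List (String × List String)) : ∀ f : Nat, ∀ (cs : List String)
    (x : String) (st r : DfsSt) (rest : List (String × List String)),
    listVisitA graph f cs st = some r →
    runB graph ((x, cs) :: rest) st = runB graph rest (teardownNode x r) := by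
  intro f
  induction f with
  | zero =>
    intro cs x st r rest h
    cases cs with
    | nil => rw [listVisitA_nil] at h; cases h; rw [runB]
    | cons c cs => rw [listVisitA_cons] at h; simp [visitA] at h
  | succ f ihf =>
    intro cs
    induction cs with
    | nil => intro x st r rest h; rw [listVisitA_nil] at h; cases h; rw [runB]
    | cons c cs' ihc =>
      intro x st r rest h
      rw [listVisitA_cons] at h
      cases h1 : visitA graph (f + 1) c st with
      | none => rw [h1] at h; simp at h
      | some st₂ =>
        rw [h1] at h; simp only [Option.bind_some] at h
        rw [visitA] at h1
        split_ifs at h1 with hd hg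
        · cases h1
          rw [runB, dif_pos hd]
          exact ihc x _ r rest h
        · cases h1
          rw [runB, dif_neg hd, dif_pos hg]
          exact ihc x _ r rest h
        · rw [show ((childrenOf graph c).foldl (fun acc c' => acc.bind (visitA graph f c'))
              (some (pushNode c st))) = listVisitA graph f (childrenOf graph c) (pushNode c st)
              from rfl] at h1
          cases h2 : listVisitA graph f (childrenOf graph c) (pushNode c st) with
          | none => rw [h2] at h1; simp at h1
          | some st₂' =>
            rw [h2] at h1; simp at h1
            rw [runB, dif_neg hd, dif_neg hg]
            rw [ihf (childrenOf graph c) c (pushNode c st) st₂' ((x, cs') :: rest) h2]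
            rw [h1]
            exact ihc x st₂ r rest h

-- the outer loop: visiting is empty between top-level iterations
lemma outerSim (graph : List (String × List String)) : ∀ (keys : List String) (f : Nat)
    (st r : DfsSt), st.visiting = [] → listVisitA graph f keys st = some r →
    keys.foldl (fun st' root =>
      if root ∈ st'.visited then st'
      else runB graph [(root, childrenOf graph root)] (pushNode root st')) st = r := by
  intro keys
  induction keys with
  | nil => intro f st r _ h; rw [listVisitA_nil] at h; cases h; rfl
  | cons k ks ih =>
    intro f st r hvg h
    rw [listVisitA_cons] at h
    cases h1 : visitA graph f k st with
    | none => rw [h1] at h; simp at h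
    | some st₂ =>
      rw [h1] at h; simp only [Option.bind_some] at h
      cases f with
      | zero => simp [visitA] at h1
      | succ f =>
        rw [visitA] at h1
        split_ifs at h1 with hd hg
        · cases h1
          rw [List.foldl_cons, if_pos hd]
          exact ih _ _ r hvg h
        · rw [hvg] at hg; simp at hg
        · rw [show ((childrenOf graph k).foldl (fun acc c => acc.bind (visitA graph f c))
              (some (pushNode k st))) = listVisitA graph f (childrenOf graph k) (pushNode k st)
              from rfl] at h1
          cases h2 : listVisitA graph f (childrenOf graph k) (pushNode k st) with
          | none => rw [h2] at h1; simp at h1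
          | some st₂' =>
            rw [h2] at h1; simp at h1
            rw [List.foldl_cons, if_neg hd]
            have hrun : runB graph [(k, childrenOf graph k)] (pushNode k st) =
                teardownNode k st₂' := by
              rw [frameSim graph f (childrenOf graph k) k (pushNode k st) st₂' [] h2, runB]
            subst h1
            rw [hrun]
            apply ih _ _ r _ h
            -- visiting of teardownNode k st₂' is []
            obtain ⟨e1, _, _⟩ := (stateA graph f).2 _ _ _ h2
            show PySem.Set.discard st₂'.visiting k = []
            rw [e1]
            show PySem.Set.discard (PySem.Set.add st.visiting k) k = []
            rw [hvg] at hg ⊢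
            rw [discard_add_of_not_mem (by simp)]

lemma length_flatMap_nodes (graph : List (String × List String)) :
    (graph.flatMap (fun p => p.1 :: p.2)).length =
      graph.length + (graph.map (fun p => p.2.length)).sum := by
  induction graph with
  | nil => rfl
  | cons p g ih => simp [List.flatMap_cons, ih]; omega

-- ===== VERDICT (by name: the statement is the Claim_ definition above) =====
theorem cycle_paths_py_spec : Claim_equal_cycle_paths_py := by
  intro graph _
  unfold Spec_cycle_paths_py cycle_paths_py cycle_paths_py_alt
  have hfc : freshCountA graph dfsInit < fuelA graph := by
    have h1 : freshCountA graph dfsInit ≤ (graph.flatMap (fun p => p.1 :: p.2)).length := by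
      apply le_trans (Finset.card_filter_le _ _) (List.toFinset_card_le _)
    rw [length_flatMap_nodes] at h1
    unfold fuelA
    omega
  have htot := (totA graph (fuelA graph)).2
    (PySem.List.sorted ((PySem.Dict.mk graph).keys) (fun x => x) false) dfsInit hfc
  cases hs : listVisitA graph (fuelA graph)
      (PySem.List.sorted ((PySem.Dict.mk graph).keys) (fun x => x) false) dfsInit with
  | none => rw [hs] at htot; simp at htot
  | some r =>
    rw [outerSim graph _ (fuelA graph) dfsInit r rfl hs]
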